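-- pv_equiv track=rewrite | github.com/spriteboysz/LeetcodePython | LCP/LCP 22. 黑白方格画.py | paintingPlan
-- ===== SOURCE A (Python) =====
-- from math import factorial
--
-- def paintingPlan(n: int, k: int) -> int:
--     if k == 0 or k == n * n:
--         return 1
--
--     def combination(a):
--         return factorial(n) // (factorial(a) * factorial(n - a))
--
--     count = 0
--     for a in range(n + 1):
--         for b in range(n + 1):
--             if (a + b) * n - a * b == k:
--                 count += combination(a) * combination(b)
--     return count
-- ===== SOURCE B (Python) =====
-- from math import comb
--
-- def paintingPlan(n: int, k: int) -> int:
--     if k == 0 or k == n * n: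
--         return 1
--     total = 0
--     for a in range(n + 1):
--         d = n - a
--         if d == 0:
--             continue  # would require k == n*n, handled above
--         q, r = divmod(k - a * n, d)
--         if r == 0 and 0 <= q <= n:
--             total += comb(n, a) * comb(n, q)
--     return total
-- ===== Notes on version B (the rewrite author's own statement) =====
-- stated objective: faster
-- what changed: Instead of scanning all (a,b) pairs, B solves the linear equation (a+b)*n - a*b = k for the unique b per a via divmod and checks integrality and range, removing the inner loop.
import Mathlib
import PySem

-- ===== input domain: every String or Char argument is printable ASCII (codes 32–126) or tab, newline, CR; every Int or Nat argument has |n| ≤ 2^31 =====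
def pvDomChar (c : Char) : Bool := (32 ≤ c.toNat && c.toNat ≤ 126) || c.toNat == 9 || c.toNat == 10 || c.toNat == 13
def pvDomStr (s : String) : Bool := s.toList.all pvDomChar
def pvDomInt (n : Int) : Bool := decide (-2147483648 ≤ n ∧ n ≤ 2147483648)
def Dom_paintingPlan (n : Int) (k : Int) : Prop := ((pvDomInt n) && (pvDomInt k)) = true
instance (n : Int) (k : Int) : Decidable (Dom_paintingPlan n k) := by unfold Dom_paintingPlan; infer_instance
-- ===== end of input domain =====

-- B replaces A's O(n^2) scan over all (a,b) pairs by solving the linear equation for the unique b per a (O(n)).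


-- ===== PORT A =====
-- math.factorial; exact for 0 ≤ m (Python raises on negatives, which A never reaches)
def pyFactorial (m : Int) : Int := (Nat.factorial m.toNat : Int)

-- A's nested helper `combination` (factorials with floor division)
def combinationA (n : Int) (a : Int) : Int :=
  PySem.Int.floordiv (pyFactorial n) (pyFactorial a * pyFactorial (n - a))

def paintingPlan (n : Int) (k : Int) : Int :=
  if k = 0 ∨ k = n * n then 1
  else
    (PySem.List.pyRange 0 (n + 1) 1).foldl (fun count a =>
      (PySem.List.pyRange 0 (n + 1) 1).foldl (fun count b =>
        if (a + b) * n - a * b = k then count + combinationA n a * combinationA n b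
        else count) count) 0

-- ===== PORT B =====
-- math.comb; exact for 0 ≤ a, 0 ≤ n (Python raises on negatives, which B never reaches)
def pyComb (n : Int) (a : Int) : Int := (Nat.choose n.toNat a.toNat : Int)

def paintingPlan_alt (n : Int) (k : Int) : Int :=
  if k = 0 ∨ k = n * n then 1
  else
    (PySem.List.pyRange 0 (n + 1) 1).foldl (fun total a =>
      let d := n - a
      if d = 0 then total
      else
        -- q, r = divmod(k - a*n, d)  (d ≠ 0 here, so divmod? is some (q, r))
        let q := PySem.Int.floordiv (k - a * n) d
        let r := PySem.Int.mod (k - a * n) d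
        if r = 0 ∧ 0 ≤ q ∧ q ≤ n then total + pyComb n a * pyComb n q
        else total) 0

-- ===== PRECONDITION & SPEC =====
def Spec_paintingPlan (n : Int) (k : Int) (out : Int) : Prop := out = paintingPlan_alt n k
instance (n : Int) (k : Int) (out : Int) : Decidable (Spec_paintingPlan n k out) := by unfold Spec_paintingPlan; infer_instance

-- ===== CLAIM (what is proved, stated in full; the proofs are below) =====
def Claim_equal_paintingPlan : Prop := ∀ (n : Int) (k : Int), Dom_paintingPlan n k → Spec_paintingPlan n k (paintingPlan n k)

-- ===== LEMMAS AND PROOFS =====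

-- combination(a) computed with factorials and // equals math.comb(n, a), for 0 ≤ a ≤ n
lemma combA_eq_comb (n a : Int) (h0 : 0 ≤ a) (h1 : a ≤ n) :
    combinationA n a = pyComb n a := by
  unfold combinationA pyComb pyFactorial
  have hna : (n - a).toNat = n.toNat - a.toNat := by omega
  have hle : a.toNat ≤ n.toNat := by omega
  rw [hna]
  have hcast : (Nat.factorial a.toNat : Int) * (Nat.factorial (n.toNat - a.toNat) : Int)
      = ((Nat.factorial a.toNat * Nat.factorial (n.toNat - a.toNat) : Nat) : Int) := by
    push_cast; ring
  rw [hcast, PySem.Int.floordiv_natCast, Nat.choose_eq_factorial_div_factorial hle]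

-- a fold adding `v x` when `p x` holds is the initial value plus a sum of ites
lemma foldl_ite_add (l : List Int) (p : Int → Prop) [DecidablePred p] (v : Int → Int) (c : Int) :
    l.foldl (fun s x => if p x then s + v x else s) c
      = c + (l.map (fun x => if p x then v x else 0)).sum := by
  have h : (fun (s x : Int) => if p x then s + v x else s)
      = (fun s x => s + (if p x then v x else 0)) := by
    funext s x; split <;> simp
  rw [h, PySem.List.foldl_add]

-- if p holds nowhere on l, the ite-sum is 0
lemma sum_ite_none (l : List Int) (p : Int → Prop) [DecidablePred p] (v : Int → Int)
    (hnone : ∀ x ∈ l, ¬ p x) :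
    (l.map (fun x => if p x then v x else 0)).sum = 0 := by
  apply List.sum_eq_zero
  intro x hx
  obtain ⟨y, hy, rfl⟩ := List.mem_map.mp hx
  rw [if_neg (hnone y hy)]

-- if p holds exactly at q ∈ l (l nodup), the ite-sum is v q
lemma sum_ite_single (l : List Int) (q : Int) (p : Int → Prop) [DecidablePred p] (v : Int → Int)
    (hq : q ∈ l) (hnd : l.Nodup) (hiff : ∀ x, p x ↔ x = q) :
    (l.map (fun x => if p x then v x else 0)).sum = v q := by
  induction l with
  | nil => cases hq
  | cons h t ih =>
    simp only [List.map_cons, List.sum_cons]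
    rcases List.nodup_cons.mp hnd with ⟨hh, ht⟩
    by_cases hhq : h = q
    · subst hhq
      rw [if_pos ((hiff h).mpr rfl)]
      have hz : (t.map (fun x => if p x then v x else 0)).sum = 0 := by
        apply sum_ite_none
        intro x hx hpx
        exact hh ((hiff x).mp hpx ▸ hx)
      rw [hz, add_zero]
    · have hq' : q ∈ t := by
        rcases List.mem_cons.mp hq with h1 | h1
        · exact absurd h1.symm hhq
        · exact h1
      rw [if_neg (fun hph => hhq ((hiff h).mp hph)), zero_add]
      exact ih hq' ht

-- the inner b-loop of A equals the single divmod step of B, for each a in the outer range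
lemma inner_eq (n k a c : Int) (hk : k ≠ n * n) (ha0 : 0 ≤ a) (ha1 : a ≤ n) :
    (PySem.List.pyRange 0 (n + 1) 1).foldl (fun count b =>
        if (a + b) * n - a * b = k then count + combinationA n a * combinationA n b
        else count) c
      = (if n - a = 0 then c
         else
           if PySem.Int.mod (k - a * n) (n - a) = 0
              ∧ 0 ≤ PySem.Int.floordiv (k - a * n) (n - a)
              ∧ PySem.Int.floordiv (k - a * n) (n - a) ≤ n then
             c + pyComb n a * pyComb n (PySem.Int.floordiv (k - a * n) (n - a))
           else c) := by
  rw [foldl_ite_add]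
  by_cases hd : n - a = 0
  · rw [if_pos hd]
    rw [sum_ite_none, add_zero]
    intro b _ hc
    apply hk
    have han : a = n := by omega
    subst han
    linear_combination -hc
  · rw [if_neg hd]
    have hdpos : 0 < n - a := by omega
    set q := PySem.Int.floordiv (k - a * n) (n - a) with hqdef
    set r := PySem.Int.mod (k - a * n) (n - a) with hrdef
    have hqr : q * (n - a) + r = k - a * n := PySem.Int.floordiv_mul_add_mod _ _
    have hr0 : 0 ≤ r := PySem.Int.mod_nonneg _ hdpos
    have hrd : r < n - a := PySem.Int.mod_lt _ hdpos
    have key : ∀ b : Int, (a + b) * n - a * b = k ↔ (b = q ∧ r = 0) := by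
      intro b
      have lin : (a + b) * n - a * b = k ↔ b * (n - a) = k - a * n := by
        constructor <;> intro h <;> linear_combination h
      rw [lin]
      constructor
      · intro h
        have h2 : b * (n - a) = q * (n - a) + r := by rw [h, hqr]
        rcases lt_trichotomy b q with hlt | heq | hgt
        · have hm := mul_lt_mul_of_pos_right hlt hdpos
          linarith
        · exact ⟨heq, by subst heq; linarith⟩
        · have hge : q + 1 ≤ b := hgt
          have hm := mul_le_mul_of_nonneg_right hge (le_of_lt hdpos)
          have hexp : (q + 1) * (n - a) = q * (n - a) + (n - a) := by ring
          linarith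
      · rintro ⟨rfl, hrz⟩
        linarith
    by_cases hcond : r = 0 ∧ 0 ≤ q ∧ q ≤ n
    · rw [if_pos hcond]
      rw [sum_ite_single _ q _ _ (PySem.List.mem_pyRange_one.mpr ⟨hcond.2.1, by omega⟩)
        (PySem.List.nodup_pyRange_one _ _)
        (fun x => by rw [key x]; constructor
                     · exact fun h => h.1
                     · exact fun h => ⟨h, hcond.1⟩)]
      rw [combA_eq_comb n a ha0 ha1, combA_eq_comb n q hcond.2.1 hcond.2.2]
    · rw [if_neg hcond]
      rw [sum_ite_none, add_zero]
      intro x hx hpx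
      obtain ⟨rfl, hrz⟩ := (key x).mp hpx
      have hm := PySem.List.mem_pyRange_one.mp hx
      exact hcond ⟨hrz, hm.1, by omega⟩

-- ===== VERDICT (by name: the statement is the Claim_ definition above) =====
theorem paintingPlan_spec : Claim_equal_paintingPlan := by
  intro n k _
  unfold Spec_paintingPlan paintingPlan paintingPlan_alt
  by_cases hk : k = 0 ∨ k = n * n
  · simp [hk]
  · rw [if_neg hk, if_neg hk]
    apply PySem.List.foldl_congr_mem
    intro acc a hmem
    have hm := PySem.List.mem_pyRange_one.mp hmem
    exact inner_eq n k a acc (fun h => hk (Or.inr h)) hm.1 (by omega)
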